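-- pv_equiv track=rewrite | github.com/edcoote/periodontal | IBM_PD_AD.py | _resolve_by_sex
-- ===== SOURCE A (Python) =====
-- from typing import Any, Dict, List, Optional, Tuple, Union
--
-- def _canonical_sex_label(sex: Optional[str]) -> str:
--     """Map free-text sex labels onto a small canonical vocabulary."""
--     if sex is None:
--         return 'unspecified'
--     label = str(sex).strip().lower()
--     if not label:
--         return 'unspecified'
--     if label in {'f', 'female', 'woman', 'women'}:
--         return 'female'
--     if label in {'m', 'male', 'man', 'men'}:
--         return 'male'
--     if label in {'all', 'any', 'either', 'both'}:
--         return 'all'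
--     return label
--
-- def _resolve_by_sex(mapping: dict, sex: Optional[str], fallbacks: tuple = ('all', 'any', 'either', 'both', 'default')) -> Any:
--     """
--     Resolve a value from a sex-keyed dictionary with standardized fallback logic.
--
--     Args:
--         mapping: Dictionary potentially keyed by sex labels
--         sex: The sex to look up
--         fallbacks: Tuple of fallback keys to try if exact match fails
--
--     Returns:
--         The resolved value, or None if no match found
--     """
--     if not mapping or not isinstance(mapping, dict):
--         return None
--
--     # Try exact sex match
--     if sex is not None:
--         target = _canonical_sex_label(sex)
--         for key, value in mapping.items():
--             if _canonical_sex_label(key) == target: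
--                 return value
--
--     # Try fallback keys
--     for fallback in fallbacks:
--         for key, value in mapping.items():
--             if _canonical_sex_label(key) == fallback or key == fallback:
--                 return value
--
--     # Return first value as last resort (maintains backward compatibility)
--     return None
-- ===== SOURCE B (Python) =====
-- def _canonical_sex_label(sex):
--     if sex is None:
--         return 'unspecified'
--     label = str(sex).strip().lower()
--     if not label:
--         return 'unspecified'
--     if label in {'f', 'female', 'woman', 'women'}:
--         return 'female'
--     if label in {'m', 'male', 'man', 'men'}:
--         return 'male'
--     if label in {'all', 'any', 'either', 'both'}:
--         return 'all'
--     return label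
--
--
-- def _resolve_by_sex(mapping, sex, fallbacks=('all', 'any', 'either', 'both', 'default')):
--     if not mapping or not isinstance(mapping, dict):
--         return None
--     # One pass: index every key under BOTH its canonical label and its raw
--     # spelling; setdefault keeps the FIRST occurrence, matching scan order.
--     index = {}
--     for key, value in mapping.items():
--         index.setdefault(_canonical_sex_label(key), value)
--         index.setdefault(key, value)
--     if sex is not None:
--         target = _canonical_sex_label(sex)
--         if target in index:
--             return index[target]
--     for fallback in fallbacks:
--         if fallback in index:
--             return index[fallback]
--     return None
-- ===== Notes on version B (the rewrite author's own statement) =====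
-- stated objective: alternative
-- what changed: Replaces A's repeated full scans of the mapping (one re-canonicalizing pass per fallback key, each recomputing _canonical_sex_label for every entry) with a single pass that builds an index dict keyed by both the canonical label and the raw key via setdefault (first occurrence wins), after which the sex lookup and each fallback become dict membership tests.
import Mathlib
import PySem

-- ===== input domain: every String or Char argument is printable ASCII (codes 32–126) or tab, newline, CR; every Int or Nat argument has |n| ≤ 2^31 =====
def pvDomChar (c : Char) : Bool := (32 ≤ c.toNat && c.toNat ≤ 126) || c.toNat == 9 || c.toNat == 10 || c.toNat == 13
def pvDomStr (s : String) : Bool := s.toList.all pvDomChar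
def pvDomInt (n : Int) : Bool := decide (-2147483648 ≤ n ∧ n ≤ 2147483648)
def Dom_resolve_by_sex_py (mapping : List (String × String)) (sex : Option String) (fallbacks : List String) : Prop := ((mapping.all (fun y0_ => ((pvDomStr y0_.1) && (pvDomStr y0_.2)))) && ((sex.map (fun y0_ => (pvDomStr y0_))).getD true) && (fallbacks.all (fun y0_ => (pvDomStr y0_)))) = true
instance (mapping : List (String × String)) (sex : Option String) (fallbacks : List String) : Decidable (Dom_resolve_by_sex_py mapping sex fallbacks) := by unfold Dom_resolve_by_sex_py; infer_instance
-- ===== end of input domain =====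

-- B restructures A's lookup: instead of A's repeated re-canonicalizing scans of the mapping
-- (one per fallback), B builds one index dict in a single pass with setdefault (first
-- occurrence wins) and answers the sex lookup and each fallback by a dict lookup.

-- ===== PORT A =====
-- shared helper: Python _canonical_sex_label (used by both programs)
def pvCanon (sex : Option String) : String :=
  match sex with
  | none => "unspecified"
  | some s =>
    let label := PySem.Str.lower (PySem.Str.strip s)
    if label = "" then "unspecified"
    else if label = "f" ∨ label = "female" ∨ label = "woman" ∨ label = "women" then "female"
    else if label = "m" ∨ label = "male" ∨ label = "man" ∨ label = "men" then "male"
    else if label = "all" ∨ label = "any" ∨ label = "either" ∨ label = "both" then "all"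
    else label

-- A's outer fallback loop: for each fallback, scan the whole mapping
def pvFallbackScanA (mapping : List (String × String)) : List String → Option String
  | [] => none
  | f :: rest =>
    match mapping.find? (fun kv => pvCanon (some kv.1) == f || kv.1 == f) with
    | some kv => some kv.2
    | none => pvFallbackScanA mapping rest

def resolve_by_sex_py (mapping : List (String × String)) (sex : Option String) (fallbacks : List String) : Option String :=
  if mapping = [] then none
  else
    let bySex : Option String :=
      match sex with
      | none => none
      | some s =>
        let target := pvCanon (some s)
        (mapping.find? (fun kv => pvCanon (some kv.1) == target)).map (fun kv => kv.2)
    match bySex with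
    | some v => some v
    | none => pvFallbackScanA mapping fallbacks

-- ===== PORT B =====
-- one pass over the items: index each key under its canonical label AND its raw spelling,
-- first occurrence wins (setdefault)
def pvBuildIndex (mapping : List (String × String)) : PySem.Dict String String :=
  mapping.foldl (fun d kv => (d.setdefault (pvCanon (some kv.1)) kv.2).setdefault kv.1 kv.2) PySem.Dict.empty

def pvFirstFallback (index : PySem.Dict String String) : List String → Option String
  | [] => none
  | f :: rest => if index.contains f then index.get? f else pvFirstFallback index rest

def resolve_by_sex_py_alt (mapping : List (String × String)) (sex : Option String) (fallbacks : List String) : Option String :=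
  if mapping = [] then none
  else
    let index := pvBuildIndex mapping
    let bySex : Option String :=
      match sex with
      | none => none
      | some s =>
        let target := pvCanon (some s)
        if index.contains target then index.get? target else none
    match bySex with
    | some v => some v
    | none => pvFirstFallback index fallbacks

-- ===== PRECONDITION & SPEC =====
def Spec_resolve_by_sex_py (mapping : List (String × String)) (sex : Option String) (fallbacks : List String) (out : Option String) : Prop := out = resolve_by_sex_py_alt mapping sex fallbacks
instance (mapping : List (String × String)) (sex : Option String) (fallbacks : List String) (out : Option String) : Decidable (Spec_resolve_by_sex_py mapping sex fallbacks out) := by unfold Spec_resolve_by_sex_py; infer_instance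

-- ===== CLAIM (what is proved, stated in full; the proofs are below) =====
def Claim_equal_resolve_by_sex_py : Prop := ∀ (mapping : List (String × String)) (sex : Option String) (fallbacks : List String), Dom_resolve_by_sex_py mapping sex fallbacks → Spec_resolve_by_sex_py mapping sex fallbacks (resolve_by_sex_py mapping sex fallbacks)

-- ===== LEMMAS AND PROOFS =====

-- ---- character-level facts about lowerChar / isspace ----
theorem pv_upper_bounds (c : Char) (h : PySem.Chars.isupper c = true) : 65 ≤ c.toNat ∧ c.toNat ≤ 90 := by
  simp only [PySem.Chars.isupper, Bool.and_eq_true, decide_eq_true_eq, Char.le_def] at h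
  exact ⟨UInt32.le_iff_toNat_le.mp h.1, UInt32.le_iff_toNat_le.mp h.2⟩

theorem pv_isspace_eq_false_of (c : Char) (h1 : 33 ≤ c.toNat) (h2 : c.toNat ≤ 132) : PySem.Chars.isspace c = false := by
  simp only [PySem.Chars.isspace, Bool.or_eq_false_iff, Bool.and_eq_false_iff, decide_eq_false_iff_not]
  omega

theorem pv_isspace_lowerChar (c : Char) : PySem.Chars.isspace (PySem.Chars.lowerChar c) = PySem.Chars.isspace c := by
  simp only [PySem.Chars.lowerChar]
  split
  · rename_i h
    obtain ⟨h1, h2⟩ := pv_upper_bounds c h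
    have hv : (c.toNat + 32).isValidChar := by left; omega
    rw [pv_isspace_eq_false_of _ (by simp [Char.toNat_ofNat, if_pos hv]; omega) (by simp [Char.toNat_ofNat, if_pos hv]; omega),
        pv_isspace_eq_false_of c (by omega) (by omega)]
  · rfl

theorem pv_not_isupper_ofNat (c : Char) (h1 : 65 ≤ c.toNat) (h2 : c.toNat ≤ 90) :
    PySem.Chars.isupper (Char.ofNat (c.toNat + 32)) = false := by
  have hv : (c.toNat + 32).isValidChar := by left; omega
  simp only [PySem.Chars.isupper, Bool.and_eq_false_iff, decide_eq_false_iff_not, Char.le_def]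
  right
  intro hle
  have h3 : (Char.ofNat (c.toNat + 32)).toNat ≤ ('Z').toNat := UInt32.le_iff_toNat_le.mp hle
  rw [Char.toNat_ofNat, if_pos hv] at h3
  have hz : ('Z').toNat = 90 := rfl
  omega

theorem pv_lowerChar_idem (c : Char) : PySem.Chars.lowerChar (PySem.Chars.lowerChar c) = PySem.Chars.lowerChar c := by
  by_cases h : PySem.Chars.isupper c = true
  · obtain ⟨h1, h2⟩ := pv_upper_bounds c h
    simp only [PySem.Chars.lowerChar, if_pos h]
    simp [pv_not_isupper_ofNat c h1 h2]
  · simp only [PySem.Chars.lowerChar, if_neg h]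

-- ---- list-level facts about lower / strip ----
theorem pv_dropWhile_idem {α : Type} (p : α → Bool) (l : List α) :
    List.dropWhile p (List.dropWhile p l) = List.dropWhile p l := by
  rw [List.dropWhile_eq_self_iff]
  intro hl hp
  have hne : List.dropWhile p l ≠ [] := by
    intro h0; rw [h0] at hl; simp at hl
  have := List.head_dropWhile_not p hne
  rw [← List.getElem_zero hl] at this
  rw [this] at hp
  exact absurd hp (by simp)

theorem pv_chars_lower_idem (l : List Char) : PySem.Chars.lower (PySem.Chars.lower l) = PySem.Chars.lower l := by
  simp only [PySem.Chars.lower, List.map_map]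
  exact List.map_congr_left (fun c _ => pv_lowerChar_idem c)

theorem pv_chars_lstrip_lower (l : List Char) :
    PySem.Chars.lstrip (PySem.Chars.lower l) = PySem.Chars.lower (PySem.Chars.lstrip l) := by
  have hfun : (PySem.Chars.isspace ∘ PySem.Chars.lowerChar) = PySem.Chars.isspace :=
    funext pv_isspace_lowerChar
  simp only [PySem.Chars.lstrip, PySem.Chars.lower, List.dropWhile_map, hfun]

theorem pv_chars_rstrip_lower (l : List Char) :
    PySem.Chars.rstrip (PySem.Chars.lower l) = PySem.Chars.lower (PySem.Chars.rstrip l) := by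
  have hfun : (PySem.Chars.isspace ∘ PySem.Chars.lowerChar) = PySem.Chars.isspace :=
    funext pv_isspace_lowerChar
  simp only [PySem.Chars.rstrip, PySem.Chars.lower, ← List.map_reverse, List.dropWhile_map, hfun]

theorem pv_chars_strip_lower (l : List Char) :
    PySem.Chars.strip (PySem.Chars.lower l) = PySem.Chars.lower (PySem.Chars.strip l) := by
  simp only [PySem.Chars.strip, pv_chars_lstrip_lower, pv_chars_rstrip_lower]

theorem pv_chars_lstrip_rstrip_lstrip (l : List Char) :
    PySem.Chars.lstrip (PySem.Chars.rstrip (PySem.Chars.lstrip l)) = PySem.Chars.rstrip (PySem.Chars.lstrip l) := by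
  set u := PySem.Chars.lstrip l with hu
  rcases heq : PySem.Chars.rstrip u with _ | ⟨a, t⟩
  · simp [PySem.Chars.lstrip]
  · -- rstrip u is a prefix of u, u starts with a non-space char
    have hpre : PySem.Chars.rstrip u <+: u := by
      rw [← List.reverse_suffix]
      simp only [PySem.Chars.rstrip, List.reverse_reverse]
      exact List.dropWhile_suffix _
    have hne : PySem.Chars.rstrip u ≠ [] := by rw [heq]; simp
    have huneq : u ≠ [] := fun h0 => hne (by rw [h0]; rfl)
    have hhead : (PySem.Chars.rstrip u).head hne = u.head huneq := List.IsPrefix.head hpre hne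
    have hul : PySem.Chars.lstrip u = u := by
      rw [hu]; simp only [PySem.Chars.lstrip]; exact pv_dropWhile_idem _ l
    have hspace : PySem.Chars.isspace (u.head huneq) = false := by
      have := List.head_dropWhile_not PySem.Chars.isspace (l := l) (by rw [← PySem.Chars.lstrip] at *; rw [hu] at huneq; exact huneq)
      simpa [PySem.Chars.lstrip, hu] using this
    rw [← heq]
    simp only [PySem.Chars.lstrip]
    rw [List.dropWhile_eq_self_iff]
    intro hl hp
    rw [← List.getElem_zero hl, List.head_eq_getElem] at hhead
    rw [hhead] at hp
    rw [List.head_eq_getElem] at hspace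
    rw [hspace] at hp
    exact absurd hp (by simp)

theorem pv_chars_strip_idem (l : List Char) :
    PySem.Chars.strip (PySem.Chars.strip l) = PySem.Chars.strip l := by
  simp only [PySem.Chars.strip]
  rw [pv_chars_lstrip_rstrip_lstrip]
  -- remains: rstrip (rstrip (lstrip l)) = rstrip (lstrip l)
  simp only [PySem.Chars.rstrip, List.reverse_reverse]
  rw [pv_dropWhile_idem]

-- ---- string-level corollaries ----
theorem pv_str_ext {s t : String} (h : s.toList = t.toList) : s = t :=
  String.toList_inj.mp h

theorem pv_str_strip_lower (s : String) :
    PySem.Str.strip (PySem.Str.lower s) = PySem.Str.lower (PySem.Str.strip s) := by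
  apply pv_str_ext
  simp [pv_chars_strip_lower]

theorem pv_str_lower_idem (s : String) :
    PySem.Str.lower (PySem.Str.lower s) = PySem.Str.lower s := by
  apply pv_str_ext
  simp [pv_chars_lower_idem]

theorem pv_str_strip_idem (s : String) :
    PySem.Str.strip (PySem.Str.strip s) = PySem.Str.strip s := by
  apply pv_str_ext
  simp [pv_chars_strip_idem]

-- the canonical label map is idempotent
theorem pv_canon_idem (s : String) : pvCanon (some (pvCanon (some s))) = pvCanon (some s) := by
  have hs : pvCanon (some s) =
      (if PySem.Str.lower (PySem.Str.strip s) = "" then "unspecified"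
       else if PySem.Str.lower (PySem.Str.strip s) = "f" ∨ PySem.Str.lower (PySem.Str.strip s) = "female" ∨ PySem.Str.lower (PySem.Str.strip s) = "woman" ∨ PySem.Str.lower (PySem.Str.strip s) = "women" then "female"
       else if PySem.Str.lower (PySem.Str.strip s) = "m" ∨ PySem.Str.lower (PySem.Str.strip s) = "male" ∨ PySem.Str.lower (PySem.Str.strip s) = "man" ∨ PySem.Str.lower (PySem.Str.strip s) = "men" then "male"
       else if PySem.Str.lower (PySem.Str.strip s) = "all" ∨ PySem.Str.lower (PySem.Str.strip s) = "any" ∨ PySem.Str.lower (PySem.Str.strip s) = "either" ∨ PySem.Str.lower (PySem.Str.strip s) = "both" then "all"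
       else PySem.Str.lower (PySem.Str.strip s)) := rfl
  rw [hs]
  set label := PySem.Str.lower (PySem.Str.strip s) with hlabel
  by_cases h0 : label = ""
  · rw [if_pos h0]; decide
  rw [if_neg h0]
  by_cases h1 : label = "f" ∨ label = "female" ∨ label = "woman" ∨ label = "women"
  · rw [if_pos h1]; decide
  rw [if_neg h1]
  by_cases h2 : label = "m" ∨ label = "male" ∨ label = "man" ∨ label = "men"
  · rw [if_pos h2]; decide
  rw [if_neg h2]
  by_cases h3 : label = "all" ∨ label = "any" ∨ label = "either" ∨ label = "both"
  · rw [if_pos h3]; decide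
  rw [if_neg h3]
  -- the free-text case: label is already stripped and lowered
  have hfix : PySem.Str.lower (PySem.Str.strip label) = label := by
    rw [hlabel, pv_str_strip_lower, pv_str_strip_idem, pv_str_lower_idem]
  show pvCanon (some label) = label
  simp only [pvCanon, hfix]
  rw [if_neg h0, if_neg h1, if_neg h2, if_neg h3]

-- ---- the index dict computes the disjunctive first-match scan ----
theorem pv_step_get? (d : PySem.Dict String String) (k v : String) (x : String) :
    ((d.setdefault (pvCanon (some k)) v).setdefault k v).get? x =
      (d.get? x).or (if pvCanon (some k) == x || k == x then some v else none) := by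
  by_cases hk : x = k
  · subst hk
    rw [PySem.Dict.get?_setdefault_self]
    by_cases hc : x = pvCanon (some x)
    · rw [← hc, PySem.Dict.get?_setdefault_self]
      simp
    · rw [PySem.Dict.get?_setdefault_of_ne _ _ (fun h => hc h)]
      simp
  · rw [PySem.Dict.get?_setdefault_of_ne _ _ hk]
    by_cases hc : x = pvCanon (some k)
    · rw [hc, PySem.Dict.get?_setdefault_self]
      simp [← hc]
    · rw [PySem.Dict.get?_setdefault_of_ne _ _ hc]
      have hfalse : (pvCanon (some k) == x || k == x) = false := by
        simp only [Bool.or_eq_false_iff, beq_eq_false_iff_ne, ne_eq]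
        exact ⟨fun h => hc h.symm, fun h => hk h.symm⟩
      rw [hfalse]
      simp

theorem pv_index_get? (mapping : List (String × String)) (x : String) :
    (pvBuildIndex mapping).get? x =
      (mapping.find? (fun kv => pvCanon (some kv.1) == x || kv.1 == x)).map (fun kv => kv.2) := by
  have main : ∀ (l : List (String × String)) (d : PySem.Dict String String),
      (l.foldl (fun d kv => (d.setdefault (pvCanon (some kv.1)) kv.2).setdefault kv.1 kv.2) d).get? x =
        (d.get? x).or ((l.find? (fun kv => pvCanon (some kv.1) == x || kv.1 == x)).map (fun kv => kv.2)) := by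
    intro l
    induction l with
    | nil => intro d; simp
    | cons kv t ih =>
      intro d
      simp only [List.foldl_cons]
      rw [ih, pv_step_get?, List.find?_cons]
      rcases kv with ⟨k, v⟩
      by_cases hp : (pvCanon (some k) == x || k == x) = true
      · rw [if_pos hp, hp]
        simp only [Option.map_some]
        cases d.get? x <;> rfl
      · rw [if_neg hp, Bool.not_eq_true] at *
        rw [hp]
        simp only [Option.or_none]
  rw [pvBuildIndex, main, PySem.Dict.get?_empty, Option.none_or]

-- ---- the sex-branch predicates agree (by idempotence of pvCanon) ----
theorem pv_sex_pred (s : String) (kv : String × String) :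
    (pvCanon (some kv.1) == pvCanon (some s) || kv.1 == pvCanon (some s)) =
      (pvCanon (some kv.1) == pvCanon (some s)) := by
  by_cases h : kv.1 = pvCanon (some s)
  · have hc : pvCanon (some kv.1) = pvCanon (some s) := by rw [h, pv_canon_idem]
    rw [hc]
    simp
  · simp [h]

-- ---- the two fallback loops agree ----
theorem pv_fallback_eq (mapping : List (String × String)) (fs : List String) :
    pvFirstFallback (pvBuildIndex mapping) fs = pvFallbackScanA mapping fs := by
  induction fs with
  | nil => rfl
  | cons f rest ih =>
    rw [pvFirstFallback, pvFallbackScanA, PySem.Dict.contains_eq_isSome_get?, pv_index_get?]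
    rcases h : mapping.find? (fun kv => pvCanon (some kv.1) == f || kv.1 == f) with _ | kv
    · simpa [h] using ih
    · simp [h]

-- ===== VERDICT (by name: the statement is the Claim_ definition above) =====
theorem resolve_by_sex_py_spec : Claim_equal_resolve_by_sex_py := by
  unfold Claim_equal_resolve_by_sex_py
  intro mapping sex fallbacks _
  unfold Spec_resolve_by_sex_py resolve_by_sex_py resolve_by_sex_py_alt
  by_cases hm : mapping = []
  · simp [hm]
  rw [if_neg hm, if_neg hm]
  simp only
  cases sex with
  | none => dsimp only; rw [pv_fallback_eq]
  | some s =>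
    have hget : (pvBuildIndex mapping).get? (pvCanon (some s)) =
        (mapping.find? (fun kv => pvCanon (some kv.1) == pvCanon (some s))).map (fun kv => kv.2) := by
      rw [pv_index_get?]
      have hp : (fun kv : String × String => pvCanon (some kv.1) == pvCanon (some s) || kv.1 == pvCanon (some s))
          = (fun kv : String × String => pvCanon (some kv.1) == pvCanon (some s)) :=
        funext (fun kv => pv_sex_pred s kv)
      rw [hp]
    dsimp only
    rw [PySem.Dict.contains_eq_isSome_get?, hget]
    rcases h : mapping.find? (fun kv => pvCanon (some kv.1) == pvCanon (some s)) with _ | kv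
    · simp only [h, Option.map_none, Option.isSome_none, Bool.false_eq_true, if_false, pv_fallback_eq]
    · simp [h]
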